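-- pv_equiv track=rewrite | github.com/tnotesjs/TNotes.leetcode | notes/2607. 使子数组元素和相等【中等】/solutions/1/1.py | makeSubKSumEqual
-- ===== SOURCE A (Python) =====
-- def makeSubKSumEqual(arr: list[int], k: int) -> int:
--     from math import gcd
--     n = len(arr)
--     g = gcd(n, k)
--     ans = 0
--     for i in range(g):
--         group = sorted(arr[j] for j in range(i, n, g))
--         mid = group[len(group) // 2]
--         ans += sum(abs(x - mid) for x in group)
--     return ans
-- ===== SOURCE B (Python) =====
-- def _select(lst, idx):
--     # idx-th smallest element (0-based) via three-way-partition quickselect; no sorting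
--     while True:
--         p = lst[len(lst) // 2]
--         lt = [x for x in lst if x < p]
--         if idx < len(lt):
--             lst = lt
--             continue
--         ceq = sum(1 for x in lst if x == p)
--         if idx < len(lt) + ceq:
--             return p
--         idx -= len(lt) + ceq
--         lst = [x for x in lst if x > p]
--
--
-- def makeSubKSumEqual(arr: list[int], k: int) -> int:
--     from math import gcd
--     g = gcd(len(arr), k)
--     buckets = [[] for _ in range(g)]
--     for j, x in enumerate(arr):
--         buckets[j % g].append(x)
--     total = 0
--     for grp in buckets:
--         m = _select(grp, len(grp) // 2)
--         total += sum(abs(x - m) for x in grp)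
--     return total
-- ===== Notes on version B (the rewrite author's own statement) =====
-- stated objective: alternative
-- what changed: A sorts every residue-class group and reads the median off the sorted list; B never sorts: it distributes the elements into buckets in one enumerate pass, finds each bucket's upper median by a three-way-partition quickselect (expected linear time), and sums absolute deviations over the unsorted bucket.
import Mathlib
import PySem

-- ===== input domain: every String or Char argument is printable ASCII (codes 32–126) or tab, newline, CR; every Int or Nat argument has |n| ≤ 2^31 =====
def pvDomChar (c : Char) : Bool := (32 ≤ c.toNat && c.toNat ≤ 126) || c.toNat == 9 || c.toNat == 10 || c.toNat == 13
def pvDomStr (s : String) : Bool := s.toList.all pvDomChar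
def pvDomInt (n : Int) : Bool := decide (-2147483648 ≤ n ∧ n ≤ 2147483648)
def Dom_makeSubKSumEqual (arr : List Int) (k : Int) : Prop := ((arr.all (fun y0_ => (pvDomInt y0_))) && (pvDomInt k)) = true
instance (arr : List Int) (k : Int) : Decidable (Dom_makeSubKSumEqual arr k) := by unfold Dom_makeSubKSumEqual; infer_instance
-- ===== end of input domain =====

-- B never sorts: it distributes elements into buckets in one enumerate pass and finds each bucket's
-- upper median by a three-way-partition quickselect, summing |x - m| over the unsorted bucket; objective: alternative.


-- ===== PORT A =====
def makeSubKSumEqual (arr : List Int) (k : Int) : Int :=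
  let n : Int := (arr.length : Int)
  let g : Int := (Int.gcd n k : Int)
  (PySem.List.pyRange 0 g 1).foldl (fun ans i =>
    let group := PySem.List.sorted ((PySem.List.pyRange i n g).map
      (fun j => PySem.List.pyGetD arr j 0)) (fun x => x) false
    -- group[len(group) // 2] is in range whenever the group is nonempty (Pre_ excludes the raising case)
    let mid := PySem.List.pyGetD group (PySem.Int.floordiv (group.length : Int) 2) 0
    ans + (group.map (fun x => |x - mid|)).sum) 0

-- ===== PORT B =====
-- port of Source B's _select: idx-th smallest via three-way-partition quickselect.
-- The while-loop is transcribed as fuel-bounded recursion (fuel = len+1 strictly dominates the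
-- loop, which drops at least one element per iteration); the fuel-0/empty branches returning 0
-- only make the loop total and are unreachable under Pre_.
def pvSelectGo : Nat → List Int → Int → Int
  | 0, _, _ => 0
  | fuel + 1, lst, idx =>
    if lst = [] then 0 else
      let p := PySem.List.pyGetD lst (PySem.Int.floordiv (lst.length : Int) 2) 0
      let lt := lst.filter (fun x => decide (x < p))
      if idx < (lt.length : Int) then pvSelectGo fuel lt idx
      else
        let ceq := (lst.filter (fun x => decide (x = p))).length
        if idx < ((lt.length + ceq : Nat) : Int) then p
        else pvSelectGo fuel (lst.filter (fun x => decide (p < x))) (idx - ((lt.length + ceq : Nat) : Int))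

def pvSelect (lst : List Int) (idx : Int) : Int := pvSelectGo (lst.length + 1) lst idx

def makeSubKSumEqual_alt (arr : List Int) (k : Int) : Int :=
  let g : Int := (Int.gcd (arr.length : Int) k : Int)
  let buckets0 : List (List Int) := (PySem.List.pyRange 0 g 1).map (fun _ => [])
  let buckets := (PySem.List.enumerate arr).foldl
    (fun bs p => PySem.List.pySetD bs (PySem.Int.mod p.1 g)
      (PySem.List.pyGetD bs (PySem.Int.mod p.1 g) [] ++ [p.2])) buckets0
  buckets.foldl (fun total grp =>
    let m := pvSelect grp (PySem.Int.floordiv (grp.length : Int) 2)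
    total + (grp.map (fun x => |x - m|)).sum) 0

-- ===== PRECONDITION & SPEC =====
-- On empty arr with k ≠ 0 both Pythons raise IndexError (A indexes an empty group, B's quickselect
-- indexes an empty bucket); Pre_ excludes exactly those inputs.
def Pre_makeSubKSumEqual (arr : List Int) (k : Int) : Prop := arr ≠ [] ∨ k = 0
instance (arr : List Int) (k : Int) : Decidable (Pre_makeSubKSumEqual arr k) := by unfold Pre_makeSubKSumEqual; infer_instance
def pvWitness_makeSubKSumEqual : List Int × Int := ([1, 2, 3, 5], 2)

def Spec_makeSubKSumEqual (arr : List Int) (k : Int) (out : Int) : Prop := out = makeSubKSumEqual_alt arr k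
instance (arr : List Int) (k : Int) (out : Int) : Decidable (Spec_makeSubKSumEqual arr k out) := by unfold Spec_makeSubKSumEqual; infer_instance

-- ===== CLAIM (what is proved, stated in full; the proofs are below) =====
def Claim_equal_makeSubKSumEqual : Prop := ∀ (arr : List Int) (k : Int), Dom_makeSubKSumEqual arr k → Pre_makeSubKSumEqual arr k → Spec_makeSubKSumEqual arr k (makeSubKSumEqual arr k)

-- ===== LEMMAS AND PROOFS =====

-- l is a permutation of its three-way partition around p
theorem perm_three (p : Int) (l : List Int) :
    (l.filter (fun x => decide (x < p)) ++ l.filter (fun x => decide (x = p))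
      ++ l.filter (fun x => decide (p < x))).Perm l := by
  have h1 := List.filter_append_perm (fun x => decide (x < p)) l
  have h2 := List.filter_append_perm (fun x => decide (x = p))
    (l.filter (fun x => !decide (x < p)))
  rw [List.filter_filter, List.filter_filter] at h2
  have e1 : l.filter (fun x => decide (x = p) && !decide (x < p))
      = l.filter (fun x => decide (x = p)) :=
    List.filter_congr (fun x _ => by by_cases hx : x = p <;> simp [hx])
  have e2 : l.filter (fun x => !decide (x = p) && !decide (x < p))
      = l.filter (fun x => decide (p < x)) :=
    List.filter_congr (fun x _ => by
      rcases lt_trichotomy x p with h | h | h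
      · simp [h, ne_of_lt h, not_lt.mpr h.le]
      · simp [h]
      · simp [h, (ne_of_lt h).symm, not_lt.mpr h.le])
  rw [e1, e2] at h2
  rw [List.append_assoc]
  exact (List.Perm.append_left _ h2).trans h1

theorem filter_eq_replicate (p : Int) (l : List Int) :
    l.filter (fun x => decide (x = p))
      = List.replicate (l.filter (fun x => decide (x = p))).length p := by
  rw [List.eq_replicate_iff]
  exact ⟨rfl, fun b hb => by simpa using (List.mem_filter.mp hb).2⟩

theorem sorted_decomp (p : Int) (l : List Int) :
    PySem.List.sorted l (fun x => x) false
      = PySem.List.sorted (l.filter (fun x => decide (x < p))) (fun x => x) false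
        ++ (List.replicate (l.filter (fun x => decide (x = p))).length p
        ++ PySem.List.sorted (l.filter (fun x => decide (p < x))) (fun x => x) false) := by
  apply PySem.List.sorted_id_eq_of_perm_of_pairwise
  · have hrep : (List.replicate (l.filter (fun x => decide (x = p))).length p).Perm
        (l.filter (fun x => decide (x = p))) := by
      rw [← filter_eq_replicate]
    refine List.Perm.trans (List.Perm.append (PySem.List.sorted_perm _ _ _)
      (List.Perm.append hrep (PySem.List.sorted_perm _ _ _))) ?_
    rw [← List.append_assoc]
    exact perm_three p l
  · have hlt : ∀ x ∈ PySem.List.sorted (l.filter (fun x => decide (x < p))) (fun x => x) false, x < p := by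
      intro x hx
      rw [PySem.List.mem_sorted] at hx
      simpa using (List.mem_filter.mp hx).2
    have hgt : ∀ x ∈ PySem.List.sorted (l.filter (fun x => decide (p < x))) (fun x => x) false, p < x := by
      intro x hx
      rw [PySem.List.mem_sorted] at hx
      simpa using (List.mem_filter.mp hx).2
    rw [List.pairwise_append]
    refine ⟨?_, ?_, ?_⟩
    · have := PySem.List.sorted_pairwise (l.filter (fun x => decide (x < p))) (fun x : Int => x)
      simpa using this
    · rw [List.pairwise_append]
      refine ⟨List.pairwise_replicate.mpr (Or.inr le_rfl), ?_, ?_⟩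
      · have := PySem.List.sorted_pairwise (l.filter (fun x => decide (p < x))) (fun x : Int => x)
        simpa using this
      · intro a ha b hb
        have ha' : a = p := List.eq_of_mem_replicate ha
        exact ha' ▸ (hgt b hb).le
    · intro a ha b hb
      rcases List.mem_append.mp hb with hb | hb
      · have hb' : b = p := List.eq_of_mem_replicate hb
        exact hb' ▸ (hlt a ha).le
      · exact ((hlt a ha).trans (hgt b hb)).le

-- quickselect returns the n-th element of the sorted list
theorem pvSelect_eq_sorted :
    ∀ (N : Nat) (lst : List Int), lst.length ≤ N → ∀ n : Nat, n < lst.length →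
      pvSelectGo (N + 1) lst (n : Int) = (PySem.List.sorted lst (fun x => x) false).getD n 0 := by
  intro N
  induction N with
  | zero => intro lst hl n hn; omega
  | succ N ih =>
    intro lst hl n hn
    have hne : lst ≠ [] := by intro h; subst h; simp at hn
    rw [pvSelectGo, if_neg hne]
    set p := PySem.List.pyGetD lst (PySem.Int.floordiv (lst.length : Int) 2) 0 with hp
    set A := lst.filter (fun x => decide (x < p)) with hA
    set c := (lst.filter (fun x => decide (x = p))).length with hc
    set C := lst.filter (fun x => decide (p < x)) with hC
    have hlen : A.length + c + C.length = lst.length := by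
      have h := (perm_three p lst).length_eq
      simp only [List.length_append] at h
      rw [← hA, ← hc, ← hC] at h
      omega
    have hppos : p ∈ lst := by
      have hpos : 0 < lst.length := List.length_pos_iff.mpr hne
      have hm : lst.length / 2 < lst.length := Nat.div_lt_self hpos (by norm_num)
      have hget : PySem.List.pyGetD lst (PySem.Int.floordiv (lst.length : Int) 2) 0
          = lst.getD (lst.length / 2) 0 := by
        have hfd : PySem.Int.floordiv ((lst.length : Nat) : Int) 2
            = ((lst.length / 2 : Nat) : Int) := by
          exact_mod_cast PySem.Int.floordiv_natCast lst.length 2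
        rw [hfd, PySem.List.pyGetD_natCast]
      rw [hp, hget, List.getD_eq_getElem _ _ hm]
      exact List.getElem_mem hm
    have hcpos : 0 < c := by
      have hmemf : p ∈ lst.filter (fun x => decide (x = p)) :=
        List.mem_filter.mpr ⟨hppos, by simp⟩
      rw [hc]
      exact List.length_pos_iff.mpr (fun hnil => by rw [hnil] at hmemf; simp at hmemf)
    have hALen : (PySem.List.sorted A (fun x => x) false).length = A.length :=
      PySem.List.length_sorted _ _ _
    have hCLen : (PySem.List.sorted C (fun x => x) false).length = C.length :=
      PySem.List.length_sorted _ _ _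
    have hdec := sorted_decomp p lst
    rw [← hA, ← hc, ← hC] at hdec
    by_cases h1 : n < A.length
    · rw [if_pos (by exact_mod_cast h1)]
      have hAN : A.length ≤ N := by
        have : A.length < lst.length := by omega
        omega
      rw [ih A hAN n h1, hdec, List.getD_append]
      omega
    · rw [if_neg (by exact_mod_cast h1)]
      by_cases h2 : n < A.length + c
      · rw [if_pos (by exact_mod_cast h2)]
        rw [hdec, List.getD_append_right]
        · rw [List.getD_append]
          · rw [List.getD_replicate]
            omega
          · simp only [List.length_replicate]
            omega
        · omega
      · rw [if_neg (by exact_mod_cast h2)]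
        have hCn : n - (A.length + c) < C.length := by omega
        have hCN : C.length ≤ N := by
          have : C.length < lst.length := by omega
          omega
        have hcast : (n : Int) - ((A.length + c : Nat) : Int) = ((n - (A.length + c) : Nat) : Int) := by
          push_cast; omega
        rw [hcast, ih C hCN _ hCn, hdec]
        rw [List.getD_append_right]
        · rw [List.getD_append_right]
          · rw [hALen, List.length_replicate]
            congr 1
            omega
          · simp only [List.length_replicate]
            omega
        · omega

-- every G-th element of l, starting at its head
def grpS : List Int → Nat → List Int
  | [], _ => []
  | x :: t, G => x :: grpS (t.drop (G - 1)) G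
  termination_by l => l.length
  decreasing_by simp only [List.length_drop, List.length_cons]; omega

theorem grpS_nil (G : Nat) : grpS [] G = [] := by simp [grpS]

theorem grpS_cons (x : Int) (t : List Int) (G : Nat) :
    grpS (x :: t) G = x :: grpS (t.drop (G - 1)) G := by simp [grpS]

-- appending one element extends the stride iff its index is a multiple of G
theorem grpS_append_singleton (G : Nat) (hG : 0 < G) :
    ∀ (l : List Int) (x : Int),
      grpS (l ++ [x]) G = grpS l G ++ (if l.length % G = 0 then [x] else []) := by
  suffices H : ∀ (N : Nat) (l : List Int), l.length ≤ N → ∀ x,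
      grpS (l ++ [x]) G = grpS l G ++ (if l.length % G = 0 then [x] else []) by
    intro l x; exact H l.length l le_rfl x
  intro N
  induction N with
  | zero =>
    intro l hl x
    have : l = [] := List.length_eq_zero_iff.mp (Nat.le_zero.mp hl)
    subst this
    simp [grpS_cons, grpS_nil, Nat.zero_mod]
  | succ N ih =>
    intro l hl x
    cases l with
    | nil => simp [grpS_cons, grpS_nil, Nat.zero_mod]
    | cons y t =>
      by_cases hlen : G - 1 ≤ t.length
      · have hdrop : (t ++ [x]).drop (G - 1) = t.drop (G - 1) ++ [x] :=
          List.drop_append_of_le_length hlen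
        have hrec := ih (t.drop (G - 1)) (by simp at hl ⊢; omega) x
        have hmod : (t.length + 1) % G = (t.length - (G - 1)) % G := by
          rw [Nat.mod_eq_sub_mod (by omega)]
          congr 1
          omega
        simp only [List.cons_append, grpS_cons, hdrop, hrec, List.length_drop,
          List.length_cons, hmod]
      · have h1 : (t ++ [x]).drop (G - 1) = [] := by
          apply List.drop_eq_nil_of_le; simp; omega
        have h2 : t.drop (G - 1) = [] := by
          apply List.drop_eq_nil_of_le; omega
        have hmod : ¬ (t.length + 1) % G = 0 := by
          rw [Nat.mod_eq_of_lt (by omega)]; omega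
        simp [List.cons_append, grpS_cons, h1, h2, grpS_nil, hmod]

-- (L - i) % G = 0 ↔ L % G = i, for i < G and i ≤ L
theorem mod_sub_iff (L i G : Nat) (hG : 0 < G) (hi : i < G) (hiL : i ≤ L) :
    (L - i) % G = 0 ↔ L % G = i := by
  constructor
  · intro h
    obtain ⟨q, hq⟩ := (Nat.dvd_iff_mod_eq_zero).mpr h
    have hL : L = G * q + i := by omega
    rw [hL, Nat.mul_add_mod, Nat.mod_eq_of_lt hi]
  · intro h
    have hdm := Nat.div_add_mod L G
    have : L - i = G * (L / G) := by omega
    rw [this]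
    exact Nat.mul_mod_right G _

-- general-step range "cons" step
theorem pyRange_pos_cons (a b s : Int) (hs : 0 < s) (hab : a < b) :
    PySem.List.pyRange a b s = a :: PySem.List.pyRange (a + s) b s := by
  rw [PySem.List.pyRange_of_pos _ _ hs, PySem.List.pyRange_of_pos _ _ hs, if_pos hab]
  have hcnt : ((b - a + s - 1) / s).toNat
      = (if a + s < b then ((b - (a + s) + s - 1) / s).toNat else 0) + 1 := by
    by_cases h2 : a + s < b
    · rw [if_pos h2]
      have e1 : b - a + s - 1 = (b - a - 1) + 1 * s := by ring
      have e2 : b - (a + s) + s - 1 = b - a - 1 := by ring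
      rw [e1, Int.add_mul_ediv_right _ _ (by omega), e2]
      have h3 : 0 ≤ (b - a - 1) / s := Int.ediv_nonneg (by omega) (by omega)
      omega
    · rw [if_neg h2]
      have e1 : b - a + s - 1 = (b - a - 1) + 1 * s := by ring
      rw [e1, Int.add_mul_ediv_right _ _ (by omega)]
      have h3 : (b - a - 1) / s = 0 := Int.ediv_eq_zero_of_lt (by omega) (by omega)
      omega
  rw [hcnt, List.range_succ_eq_map]
  simp only [List.map_cons, List.map_map, Nat.cast_zero, mul_zero, add_zero, List.cons.injEq,
    true_and]
  apply List.map_congr_left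
  intro q _
  simp only [Function.comp_apply, Nat.succ_eq_add_one]
  push_cast
  ring

theorem mapA_nil (arr : List Int) (G : Nat) (hG : 0 < G) (i : Nat) (hge : arr.length ≤ i) :
    (PySem.List.pyRange (i : Int) (arr.length : Int) (G : Int)).map
      (fun j => PySem.List.pyGetD arr j 0) = grpS (arr.drop i) G := by
  have h1 : PySem.List.pyRange (i : Int) (arr.length : Int) (G : Int) = [] := by
    rw [PySem.List.pyRange_of_pos _ _ (by exact_mod_cast hG)]
    rw [if_neg (by exact_mod_cast not_lt.mpr hge)]
    simp
  rw [h1, List.drop_eq_nil_of_le hge, grpS_nil, List.map_nil]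

-- A's strided gather equals grpS of the dropped list
theorem mapA_eq_grpS (arr : List Int) (G : Nat) (hG : 0 < G) (i : Nat) :
    (PySem.List.pyRange (i : Int) (arr.length : Int) (G : Int)).map
      (fun j => PySem.List.pyGetD arr j 0) = grpS (arr.drop i) G := by
  suffices H : ∀ (N i : Nat), arr.length - i ≤ N →
      (PySem.List.pyRange (i : Int) (arr.length : Int) (G : Int)).map
        (fun j => PySem.List.pyGetD arr j 0) = grpS (arr.drop i) G by
    exact H (arr.length - i) i le_rfl
  intro N
  induction N with
  | zero =>
    intro i hi
    exact mapA_nil arr G hG i (by omega)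
  | succ N ih =>
    intro i hi
    by_cases hlt : i < arr.length
    · rw [pyRange_pos_cons (i : Int) (arr.length : Int) (G : Int)
        (by exact_mod_cast hG) (by exact_mod_cast hlt)]
      have hcast : ((i : Int) + (G : Int)) = ((i + G : Nat) : Int) := by push_cast; ring
      rw [List.map_cons, hcast, ih (i + G) (by omega), PySem.List.pyGetD_natCast]
      have harith1 : (G - 1) + (i + 1) = i + G := by omega
      have harith2 : (i + 1) + (G - 1) = i + G := by omega
      rw [List.drop_eq_getElem_cons hlt, grpS_cons, List.drop_drop]
      rw [List.getD_eq_getElem arr 0 hlt]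
      simp only [harith2]
    · exact mapA_nil arr G hG i (by omega)

-- updating one slot of a map over range
theorem set_map_range {α : Type} (G m : Nat) (f : Nat → α) (v : α) :
    ((List.range G).map f).set m v
      = (List.range G).map (fun i => if i = m then v else f i) := by
  apply List.ext_getElem
  · simp
  · intro j h1 h2
    simp only [List.getElem_set, List.getElem_map, List.getElem_range]
    split_ifs with e1 e2 e2 <;> first | rfl | omega

-- B's distribution loop builds exactly the strided groups
theorem bfold (G : Nat) (hG : 0 < G) :
    ∀ (rest pre : List Int),
      (PySem.List.enumerate rest (pre.length : Int)).foldl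
        (fun bs p => PySem.List.pySetD bs (PySem.Int.mod p.1 (G : Int))
          (PySem.List.pyGetD bs (PySem.Int.mod p.1 (G : Int)) [] ++ [p.2]))
        ((List.range G).map (fun i => grpS (pre.drop i) G))
      = (List.range G).map (fun i => grpS ((pre ++ rest).drop i) G) := by
  intro rest
  induction rest with
  | nil => intro pre; simp [PySem.List.enumerate_nil]
  | cons x rest ih =>
    intro pre
    rw [PySem.List.enumerate_cons, List.foldl_cons]
    have hm : PySem.Int.mod ((pre.length : Int)) (G : Int) = ((pre.length % G : Nat) : Int) :=
      PySem.Int.mod_natCast pre.length G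
    have hmlt : pre.length % G < G := Nat.mod_lt _ hG
    have hmle : pre.length % G ≤ pre.length := Nat.mod_le _ _
    have hget : ((List.range G).map (fun i => grpS (pre.drop i) G)).getD (pre.length % G) []
        = grpS (pre.drop (pre.length % G)) G := by
      rw [List.getD_eq_getElem _ _ (by simpa using hmlt)]
      simp
    have hstep : PySem.List.pySetD ((List.range G).map (fun i => grpS (pre.drop i) G))
          (PySem.Int.mod (pre.length : Int) (G : Int))
          (PySem.List.pyGetD ((List.range G).map (fun i => grpS (pre.drop i) G))
            (PySem.Int.mod (pre.length : Int) (G : Int)) [] ++ [x])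
        = (List.range G).map (fun i => grpS ((pre ++ [x]).drop i) G) := by
      simp only [hm, PySem.List.pyGetD_natCast, PySem.List.pySetD_natCast, hget]
      rw [set_map_range]
      apply List.map_congr_left
      intro i hi
      rw [List.mem_range] at hi
      by_cases he : i = pre.length % G
      · subst he
        rw [if_pos rfl, List.drop_append_of_le_length hmle,
          grpS_append_singleton G hG]
        have hz : (pre.drop (pre.length % G)).length % G = 0 := by
          rw [List.length_drop]
          exact (mod_sub_iff pre.length (pre.length % G) G hG hmlt hmle).mpr rfl
        rw [if_pos hz]
      · rw [if_neg he]
        by_cases hiL : i ≤ pre.length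
        · rw [List.drop_append_of_le_length hiL, grpS_append_singleton G hG]
          have hnz : ¬ (pre.drop i).length % G = 0 := by
            rw [List.length_drop, mod_sub_iff pre.length i G hG hi hiL]
            intro hcon
            exact he (by omega)
          rw [if_neg hnz, List.append_nil]
        · rw [List.drop_eq_nil_of_le, List.drop_eq_nil_of_le]
          all_goals first
            | omega
            | (simp only [List.length_append, List.length_cons, List.length_nil]; omega)
    dsimp only
    rw [hstep]
    have hlen : ((pre ++ [x]).length : Int) = (pre.length : Int) + 1 := by simp
    have := ih (pre ++ [x])
    rw [hlen] at this
    rw [this, List.append_assoc]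
    simp

-- A's per-group cost (sorted median + abs sum over sorted) equals B's (quickselect + abs sum over raw group)
theorem per_group (t : List Int) :
    ((PySem.List.sorted t (fun x => x) false).map (fun x =>
        |x - PySem.List.pyGetD (PySem.List.sorted t (fun x => x) false)
          (PySem.Int.floordiv (((PySem.List.sorted t (fun x => x) false).length : Nat) : Int) 2) 0|)).sum
      = (t.map (fun x =>
          |x - pvSelect t (PySem.Int.floordiv ((t.length : Nat) : Int) 2)|)).sum := by
  by_cases hne : t = []
  · subst hne; simp [PySem.List.sorted]
  · have hpos : 0 < t.length := List.length_pos_iff.mpr hne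
    have hL : (PySem.List.sorted t (fun x => x) false).length = t.length :=
      PySem.List.length_sorted _ _ _
    have hfd : PySem.Int.floordiv ((t.length : Nat) : Int) 2 = ((t.length / 2 : Nat) : Int) := by
      exact_mod_cast PySem.Int.floordiv_natCast t.length 2
    have hhl : t.length / 2 < t.length := Nat.div_lt_self hpos (by norm_num)
    have hsel : pvSelect t (PySem.Int.floordiv ((t.length : Nat) : Int) 2)
        = (PySem.List.sorted t (fun x => x) false).getD (t.length / 2) 0 := by
      rw [hfd]
      show pvSelectGo (t.length + 1) t ((t.length / 2 : Nat) : Int)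
        = (PySem.List.sorted t (fun x => x) false).getD (t.length / 2) 0
      exact pvSelect_eq_sorted t.length t le_rfl (t.length / 2) hhl
    have hmid : PySem.List.pyGetD (PySem.List.sorted t (fun x => x) false)
        (PySem.Int.floordiv (((PySem.List.sorted t (fun x => x) false).length : Nat) : Int) 2) 0
        = (PySem.List.sorted t (fun x => x) false).getD (t.length / 2) 0 := by
      rw [hL, hfd, PySem.List.pyGetD_natCast]
    rw [hmid, hsel]
    exact List.Perm.sum_eq ((PySem.List.sorted_perm _ _ _).map _)

theorem makeSubKSumEqual_equal_all (arr : List Int) (k : Int) :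
    makeSubKSumEqual arr k = makeSubKSumEqual_alt arr k := by
  by_cases hG0 : Int.gcd (arr.length : Int) k = 0
  · have hnk := Int.gcd_eq_zero_iff.mp hG0
    have harr : arr = [] := List.length_eq_zero_iff.mp (by exact_mod_cast hnk.1)
    have hk : k = 0 := hnk.2
    subst harr; subst hk; decide
  · have hGpos : 0 < Int.gcd (arr.length : Int) k := Nat.pos_of_ne_zero hG0
    simp only [makeSubKSumEqual, makeSubKSumEqual_alt]
    set G := Int.gcd (arr.length : Int) k with hGdef
    rw [PySem.List.pyRange_zero_nat G, List.foldl_map, PySem.List.foldl_add, List.map_map]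
    have hb0 : List.map ((fun (_ : Int) => ([] : List Int)) ∘ (fun (k : Nat) => ((k : Int)))) (List.range G)
        = (List.range G).map (fun i => grpS (([] : List Int).drop i) G) := by
      simp [Function.comp_def, grpS_nil]
    have hbf := bfold G hGpos arr []
    simp only [List.length_nil, Nat.cast_zero, List.nil_append] at hbf
    rw [hb0, hbf, PySem.List.foldl_add, List.map_map]
    congr 1
    refine congrArg List.sum (List.map_congr_left ?_)
    intro i hi
    simp only [Function.comp_apply]
    rw [mapA_eq_grpS arr G hGpos i]
    exact per_group (grpS (arr.drop i) G)

-- ===== VERDICT (by name: the statement is the Claim_ definition above) =====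
theorem makeSubKSumEqual_spec : Claim_equal_makeSubKSumEqual := by
  intro arr k _ _
  unfold Spec_makeSubKSumEqual
  exact makeSubKSumEqual_equal_all arr k
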